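-- pv_equiv track=rewrite | github.com/maorsarusi/python_pycharm | filesAndScripts/calculator.py | write_solution
-- ===== SOURCE A (Python) =====
-- WRONG = " is wrong operator\n"
--
-- def write_solution(split_list, results_list):
--     """
--     function write_solution gets two lists of exercises and solutions
--      and union them to one list
--     :param split_list: the exercises list
--     :param results_list: the solutions list
--     :return: new list with exercises and solutions
--     """
--     result_index = 0
--     split_list_index = 0
--     list_with_solution = []
--     for i in split_list:
--         split_list_index += 1
--         if not WRONG in str(results_list[result_index]):  # we write a string if the format didn't good
--             list_with_solution.append(i)
--             if split_list_index % 3 == 0:  # every 3 places we need to put '='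
--                 list_with_solution.append("=")
--                 list_with_solution.append(str(results_list[result_index]))
--                 result_index += 1
--         else:
--             if split_list_index % 3 == 0:
--                 list_with_solution.append(results_list[result_index])
--                 result_index += 1
--     return list_with_solution
-- ===== SOURCE B (Python) =====
-- WRONG = " is wrong operator\n"
--
-- def write_solution(split_list, results_list):
--     """Group-wise re-implementation: walk split_list in chunks of three,
--     pairing group g with results_list[g]."""
--     out = []
--     for g in range(0, len(split_list), 3):
--         chunk = split_list[g:g + 3]
--         r = results_list[g // 3]
--         if WRONG not in str(r):
--             out.extend(chunk)
--             if len(chunk) == 3: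
--                 out.append("=")
--                 out.append(str(r))
--         elif len(chunk) == 3:
--             out.append(r)
--     return out
-- ===== Notes on version B (the rewrite author's own statement) =====
-- stated objective: alternative
-- what changed: A walks split_list element by element maintaining a running position counter and a separately incremented result index with mod-3 tests; B iterates group-wise, consuming split_list in chunks of three paired with results_list[g], so the counters and mod arithmetic disappear.
import Mathlib
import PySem

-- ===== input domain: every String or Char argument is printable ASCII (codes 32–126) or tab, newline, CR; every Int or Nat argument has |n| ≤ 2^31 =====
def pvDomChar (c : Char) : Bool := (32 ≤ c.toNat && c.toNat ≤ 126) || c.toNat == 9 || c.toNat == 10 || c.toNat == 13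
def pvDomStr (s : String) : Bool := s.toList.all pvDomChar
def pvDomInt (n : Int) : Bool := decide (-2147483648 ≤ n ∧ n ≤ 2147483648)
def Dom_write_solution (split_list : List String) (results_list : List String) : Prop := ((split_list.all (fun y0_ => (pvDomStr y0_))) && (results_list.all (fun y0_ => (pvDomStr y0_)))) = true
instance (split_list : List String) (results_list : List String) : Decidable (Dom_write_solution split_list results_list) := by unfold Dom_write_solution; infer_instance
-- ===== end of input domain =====

-- B walks split_list group-wise (chunks of three paired with one result) instead of
-- A's element-wise loop with two counters and mod-3 tests; same cost, plainer shape.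

-- ===== PORT A =====
def pyWRONG : String := " is wrong operator\n"

-- A's for-loop as structural recursion over the same state (result_index, split_list_index, acc).
-- results_list[result_index] is PySem.List.pyGet?; Pre_ below excludes the IndexError (none) case,
-- where we default to "" (never reached inside Pre_).
def write_solution_go (results_list : List String) :
    List String → Nat → Nat → List String → List String
  | [], _, _, acc => acc
  | i :: rest, ri, si, acc =>
    let si' := si + 1
    let r := (PySem.List.pyGet? results_list (ri : Int)).getD ""
    if PySem.Str.isIn pyWRONG r = false then
      if si' % 3 = 0 then
        write_solution_go results_list rest (ri + 1) si' (acc ++ [i, "=", r])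
      else
        write_solution_go results_list rest ri si' (acc ++ [i])
    else
      if si' % 3 = 0 then
        write_solution_go results_list rest (ri + 1) si' (acc ++ [r])
      else
        write_solution_go results_list rest ri si' acc

def write_solution (split_list : List String) (results_list : List String) : List String :=
  write_solution_go results_list split_list 0 0 []

-- ===== PORT B =====
-- B's loop 'for g in range(0, len, 3)' with slice split_list[g:g+3] and results_list[g//3],
-- ported as recursion consuming three elements per step (take 3 / drop 3 = the slice).
def write_solution_alt_go (results_list : List String) (k : Nat) (l : List String) :
    List String :=
  match l with
  | [] => []
  | i :: rest =>
    let chunk := (i :: rest).take 3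
    let r := (PySem.List.pyGet? results_list (k : Int)).getD ""
    (if PySem.Str.isIn pyWRONG r = false then
       chunk ++ (if chunk.length = 3 then ["=", r] else [])
     else
       (if chunk.length = 3 then [r] else []))
    ++ write_solution_alt_go results_list (k + 1) (rest.drop 2)
termination_by l.length
decreasing_by simp

def write_solution_alt (split_list : List String) (results_list : List String) : List String :=
  write_solution_alt_go results_list 0 split_list

-- ===== PRECONDITION & SPEC =====
-- A raises IndexError (reads results_list[⌊idx/3⌋] for every element) whenever
-- split_list is longer than 3·len(results_list); exactly those inputs are excluded.
def Pre_write_solution (split_list : List String) (results_list : List String) : Prop :=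
  split_list.length ≤ 3 * results_list.length
instance (split_list : List String) (results_list : List String) : Decidable (Pre_write_solution split_list results_list) := by unfold Pre_write_solution; infer_instance

def pvWitness_write_solution : List String × List String :=
  (["1", "+", "2", "3", " is wrong operator\n"], ["3", "3 is wrong operator\n"])

def Spec_write_solution (split_list : List String) (results_list : List String) (out : List String) : Prop := out = write_solution_alt split_list results_list
instance (split_list : List String) (results_list : List String) (out : List String) : Decidable (Spec_write_solution split_list results_list out) := by unfold Spec_write_solution; infer_instance

-- ===== CLAIM (what is proved, stated in full; the proofs are below) =====
def Claim_equal_write_solution : Prop := ∀ (split_list : List String) (results_list : List String), Dom_write_solution split_list results_list → Pre_write_solution split_list results_list → Spec_write_solution split_list results_list (write_solution split_list results_list)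

-- ===== LEMMAS AND PROOFS =====

-- one-step unfoldings of B's well-founded recursion (simp-safe: rest stays a variable)
lemma alt_go_nil (results : List String) (k : Nat) :
    write_solution_alt_go results k [] = [] := by
  rw [write_solution_alt_go.eq_def]

lemma alt_go_cons (results : List String) (k : Nat) (i : String) (rest : List String) :
    write_solution_alt_go results k (i :: rest) =
      (let chunk := (i :: rest).take 3
       let r := (PySem.List.pyGet? results (k : Int)).getD ""
       (if PySem.Str.isIn pyWRONG r = false then
          chunk ++ (if chunk.length = 3 then ["=", r] else [])
        else
          (if chunk.length = 3 then [r] else []))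
       ++ write_solution_alt_go results (k + 1) (rest.drop 2)) := by
  rw [write_solution_alt_go.eq_def]

-- Core correspondence: A's loop started at a group boundary (split_list_index = 3*m,
-- result_index = k) produces acc ++ B's group-wise output.
lemma go_eq (results : List String) :
    ∀ (n : Nat) (l : List String), l.length ≤ n →
      ∀ (k m : Nat) (acc : List String),
        write_solution_go results l k (3 * m) acc
          = acc ++ write_solution_alt_go results k l := by
  intro n
  induction n with
  | zero =>
    intro l hl k m acc
    have : l = [] := List.length_eq_zero_iff.mp (Nat.le_zero.mp hl)
    subst this
    simp [write_solution_go, alt_go_nil]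
  | succ n ih =>
    intro l hl k m acc
    match l with
    | [] => simp [write_solution_go, alt_go_nil]
    | [a] =>
      have h1 : (3 * m + 1) % 3 ≠ 0 := by omega
      by_cases h : PySem.Chars.isIn pyWRONG.toList ((results[k]?.getD "")).toList = false <;>
        simp [write_solution_go, alt_go_cons, alt_go_nil, h]
    | [a, b] =>
      have h1 : (3 * m + 1) % 3 ≠ 0 := by omega
      have h2 : (3 * m + 1 + 1) % 3 ≠ 0 := by omega
      by_cases h : PySem.Chars.isIn pyWRONG.toList ((results[k]?.getD "")).toList = false <;>
        simp [write_solution_go, alt_go_cons, alt_go_nil, h, h2]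
    | a :: b :: c :: rest =>
      have h1 : (3 * m + 1) % 3 ≠ 0 := by omega
      have h2 : (3 * m + 1 + 1) % 3 ≠ 0 := by omega
      have h3 : (3 * m + 1 + 1 + 1) % 3 = 0 := by omega
      have hm : 3 * m + 1 + 1 + 1 = 3 * (m + 1) := by ring
      have hr : rest.length ≤ n := by simp at hl; omega
      by_cases h : PySem.Chars.isIn pyWRONG.toList ((results[k]?.getD "")).toList = false <;>
        simp only [write_solution_go, alt_go_cons, h, h1, h2, h3, hm,
          if_false, if_pos, List.take, List.drop, List.length] <;>
        simp [h, ih rest hr (k + 1) (m + 1)]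

-- ===== VERDICT (by name: the statement is the Claim_ definition above) =====
theorem write_solution_spec : Claim_equal_write_solution := by
  intro split_list results_list _ _
  unfold Spec_write_solution write_solution write_solution_alt
  have := go_eq results_list split_list.length split_list (le_refl _) 0 0 []
  simpa using this
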